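-- pv_equiv track=rewrite | github.com/whuTuTu/FundInv | InvokingFunction/GetGFunction.py | getHYtime4list
-- ===== SOURCE A (Python) =====
-- def getHYtime4list(beginDate, lastYearDate):
--     """
--     获取半年度频率时间节点
--     :param beginDate:
--     :param lastYearDate:
--     :return:
--     """
--     beginyear = beginDate[0:4]
--     endyear = lastYearDate[0:4]
--     monthday = ['0630', '1231']
--     aRepDate = [str(i) + j for i in range(int(beginyear), int(endyear) + 1) for j in monthday]
--     repDateY = []
--     for i in aRepDate:
--         if lastYearDate >= i >= beginDate:
--             repDateY.append(i)
--         else: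
--             continue
--     return repDateY
-- ===== SOURCE B (Python) =====
-- def getHYtime4list(beginDate, lastYearDate):
--     cand = [str(y) + m
--             for y in range(int(beginDate[0:4]), int(lastYearDate[0:4]) + 1)
--             for m in ('0630', '1231')]
--
--     def bisect_left(a, x):
--         lo, hi = 0, len(a)
--         while lo < hi:
--             mid = (lo + hi) // 2
--             if a[mid] < x:
--                 lo = mid + 1
--             else:
--                 hi = mid
--         return lo
--
--     def bisect_right(a, x):
--         lo, hi = 0, len(a)
--         while lo < hi:
--             mid = (lo + hi) // 2
--             if x < a[mid]:
--                 hi = mid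
--             else:
--                 lo = mid + 1
--         return lo
--
--     return cand[bisect_left(cand, beginDate):bisect_right(cand, lastYearDate)]
-- ===== Notes on version B (the rewrite author's own statement) =====
-- stated objective: alternative
-- what changed: B replaces A's per-element two-sided comparison loop over the candidate list with two hand-rolled binary searches (lower bound for beginDate, upper bound for lastYearDate) on the lexicographically sorted candidate list and returns the contiguous slice between them.
-- outside the precondition, e.g. on getHYtime4list('06', '11'): A returns ['100630', '101231'], B returns []
import Mathlib
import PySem

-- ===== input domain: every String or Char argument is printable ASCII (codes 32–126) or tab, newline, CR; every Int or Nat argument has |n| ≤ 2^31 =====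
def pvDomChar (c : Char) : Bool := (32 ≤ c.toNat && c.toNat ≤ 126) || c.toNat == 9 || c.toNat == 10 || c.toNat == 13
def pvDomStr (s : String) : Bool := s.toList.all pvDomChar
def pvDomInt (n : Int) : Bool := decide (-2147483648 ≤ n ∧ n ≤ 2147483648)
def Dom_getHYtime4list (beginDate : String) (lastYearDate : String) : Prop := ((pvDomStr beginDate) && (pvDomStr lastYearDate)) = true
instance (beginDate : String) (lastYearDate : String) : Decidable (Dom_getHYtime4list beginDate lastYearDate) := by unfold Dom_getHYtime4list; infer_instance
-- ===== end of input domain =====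

-- B replaces A's per-element two-sided filter loop with two hand-rolled binary searches
-- (lower bound for beginDate, upper bound for lastYearDate) and one contiguous slice of
-- the sorted candidate list; same result on Pre_, no speed claim.

-- ===== PORT A =====
def getHYtime4list (beginDate : String) (lastYearDate : String) : List String :=
  let beginyear := PySem.Str.slice beginDate (some 0) (some 4)
  let endyear := PySem.Str.slice lastYearDate (some 0) (some 4)
  match PySem.Int.ofStr? beginyear, PySem.Int.ofStr? endyear with
  | some by_, some ey =>
    let monthday := ["0630", "1231"]
    let aRepDate := (PySem.List.pyRange by_ (ey + 1) 1).flatMap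
      (fun i => monthday.map (fun j => PySem.Int.toStr i ++ j))
    aRepDate.foldl (fun repDateY i =>
      if lastYearDate ≥ i ∧ i ≥ beginDate then repDateY ++ [i] else repDateY) []
  | _, _ => []  -- int() raises ValueError here; excluded by Pre_

-- ===== PORT B =====
-- Source B's hand-written bisect_left while-loop; a[mid] is ported as getD (mid is always in
-- range when the loop is entered with hi ≤ a.length, as B calls it).
def pvBisectLeftLoop (a : List String) (x : String) (low hi : Nat) : Nat :=
  if low < hi then
    if a.getD ((low + hi) / 2) "" < x then pvBisectLeftLoop a x ((low + hi) / 2 + 1) hi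
    else pvBisectLeftLoop a x low ((low + hi) / 2)
  else low
termination_by hi - low
decreasing_by all_goals omega

-- Source B's hand-written bisect_right while-loop
def pvBisectRightLoop (a : List String) (x : String) (low hi : Nat) : Nat :=
  if low < hi then
    if x < a.getD ((low + hi) / 2) "" then pvBisectRightLoop a x low ((low + hi) / 2)
    else pvBisectRightLoop a x ((low + hi) / 2 + 1) hi
  else low
termination_by hi - low
decreasing_by all_goals omega

def getHYtime4list_alt (beginDate : String) (lastYearDate : String) : List String :=
  match PySem.Int.ofStr? (PySem.Str.slice beginDate (some 0) (some 4)) with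
  | none => []  -- int() raises ValueError here; excluded by Pre_
  | some by_ =>
    match PySem.Int.ofStr? (PySem.Str.slice lastYearDate (some 0) (some 4)) with
    | none => []  -- int() raises ValueError here; excluded by Pre_
    | some ey =>
      let cand := (PySem.List.pyRange by_ (ey + 1) 1).flatMap
        (fun y => (["0630", "1231"]).map (fun m => PySem.Int.toStr y ++ m))
      PySem.List.slice cand (some ((pvBisectLeftLoop cand beginDate 0 cand.length : Nat) : Int))
        (some ((pvBisectRightLoop cand lastYearDate 0 cand.length : Nat) : Int))

-- ===== PRECONDITION & SPEC =====
-- Pre_ excludes (a) inputs where int(beginDate[0:4]) or int(lastYearDate[0:4]) raises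
-- ValueError in A, and (b) inputs outside the natural domain of date strings: prefixes
-- that int() still accepts (signed, whitespace-padded or zero-padded, e.g. ' 999' or
-- '0999') whose parsed year range spans years of different decimal widths (or negative
-- years): there str(y) lengths vary, the candidate list is not lexicographically sorted,
-- and a sorted-slice reading of the task does not apply.  Degenerate (empty or
-- single-year) ranges and any same-width range are admitted.
def Pre_getHYtime4list (beginDate : String) (lastYearDate : String) : Prop :=
  (PySem.Int.ofStr? (PySem.Str.slice beginDate (some 0) (some 4))).isSome = true ∧
  (PySem.Int.ofStr? (PySem.Str.slice lastYearDate (some 0) (some 4))).isSome = true ∧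
  ((PySem.Int.ofStr? (PySem.Str.slice lastYearDate (some 0) (some 4))).getD 0 ≤
      (PySem.Int.ofStr? (PySem.Str.slice beginDate (some 0) (some 4))).getD 0 ∨
   (1 ≤ (PySem.Int.ofStr? (PySem.Str.slice beginDate (some 0) (some 4))).getD 0 ∧
      (PySem.Int.ofStr? (PySem.Str.slice lastYearDate (some 0) (some 4))).getD 0 ≤ 9) ∨
   (10 ≤ (PySem.Int.ofStr? (PySem.Str.slice beginDate (some 0) (some 4))).getD 0 ∧
      (PySem.Int.ofStr? (PySem.Str.slice lastYearDate (some 0) (some 4))).getD 0 ≤ 99) ∨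
   (100 ≤ (PySem.Int.ofStr? (PySem.Str.slice beginDate (some 0) (some 4))).getD 0 ∧
      (PySem.Int.ofStr? (PySem.Str.slice lastYearDate (some 0) (some 4))).getD 0 ≤ 999) ∨
   (1000 ≤ (PySem.Int.ofStr? (PySem.Str.slice beginDate (some 0) (some 4))).getD 0 ∧
      (PySem.Int.ofStr? (PySem.Str.slice lastYearDate (some 0) (some 4))).getD 0 ≤ 9999))
instance (beginDate : String) (lastYearDate : String) : Decidable (Pre_getHYtime4list beginDate lastYearDate) := by
  unfold Pre_getHYtime4list; infer_instance

def pvWitness_getHYtime4list : String × String := ("20190701", "20201231")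

def Spec_getHYtime4list (beginDate : String) (lastYearDate : String) (out : List String) : Prop := out = getHYtime4list_alt beginDate lastYearDate
instance (beginDate : String) (lastYearDate : String) (out : List String) : Decidable (Spec_getHYtime4list beginDate lastYearDate out) := by unfold Spec_getHYtime4list; infer_instance

-- ===== CLAIM (what is proved, stated in full; the proofs are below) =====
def Claim_equal_getHYtime4list : Prop := ∀ (beginDate : String) (lastYearDate : String), Dom_getHYtime4list beginDate lastYearDate → Pre_getHYtime4list beginDate lastYearDate → Spec_getHYtime4list beginDate lastYearDate (getHYtime4list beginDate lastYearDate)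

-- ===== LEMMAS AND PROOFS =====

theorem pv_digitChar_lt (a b : Nat) (hab : a < b) (hb : b ≤ 9) :
    Nat.digitChar a < Nat.digitChar b := by
  have ha : a ≤ 8 := by omega
  interval_cases a <;> interval_cases b <;> decide

-- str(n) for 1000 ≤ n ≤ 9999 is its four decimal digit characters
theorem pv_toChars4 (n : Int) (h1 : 1000 ≤ n) (h2 : n ≤ 9999) :
    PySem.Int.toChars n = [Nat.digitChar (n.toNat / 1000), Nat.digitChar (n.toNat / 100 % 10),
      Nat.digitChar (n.toNat / 10 % 10), Nat.digitChar (n.toNat % 10)] := by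
  have h0 : ¬ n < 0 := by omega
  have hm1 : 1000 ≤ n.toNat := by omega
  have hm2 : n.toNat ≤ 9999 := by omega
  simp only [PySem.Int.toChars, h0, if_false]
  rw [Nat.toDigits_eq_if (by norm_num), if_neg (by omega)]
  rw [Nat.toDigits_eq_if (by norm_num), if_neg (by omega)]
  rw [Nat.toDigits_eq_if (by norm_num), if_neg (by omega)]
  rw [Nat.toDigits_eq_if (by norm_num), if_pos (by omega)]
  simp [Nat.div_div_eq_div_mul]

theorem pv_toChars1 (n : Int) (h1 : 0 ≤ n) (h2 : n ≤ 9) :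
    PySem.Int.toChars n = [Nat.digitChar n.toNat] := by
  have h0 : ¬ n < 0 := by omega
  simp only [PySem.Int.toChars, h0, if_false]
  rw [Nat.toDigits_eq_if (by norm_num), if_pos (by omega)]

theorem pv_toChars2 (n : Int) (h1 : 10 ≤ n) (h2 : n ≤ 99) :
    PySem.Int.toChars n = [Nat.digitChar (n.toNat / 10), Nat.digitChar (n.toNat % 10)] := by
  have h0 : ¬ n < 0 := by omega
  have hm1 : 10 ≤ n.toNat := by omega
  have hm2 : n.toNat ≤ 99 := by omega
  simp only [PySem.Int.toChars, h0, if_false]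
  rw [Nat.toDigits_eq_if (by norm_num), if_neg (by omega)]
  rw [Nat.toDigits_eq_if (by norm_num), if_pos (by omega)]
  rfl

theorem pv_toChars3 (n : Int) (h1 : 100 ≤ n) (h2 : n ≤ 999) :
    PySem.Int.toChars n = [Nat.digitChar (n.toNat / 100), Nat.digitChar (n.toNat / 10 % 10),
      Nat.digitChar (n.toNat % 10)] := by
  have h0 : ¬ n < 0 := by omega
  have hm1 : 100 ≤ n.toNat := by omega
  have hm2 : n.toNat ≤ 999 := by omega
  simp only [PySem.Int.toChars, h0, if_false]
  rw [Nat.toDigits_eq_if (by norm_num), if_neg (by omega)]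
  rw [Nat.toDigits_eq_if (by norm_num), if_neg (by omega)]
  rw [Nat.toDigits_eq_if (by norm_num), if_pos (by omega)]
  simp [Nat.div_div_eq_div_mul]

-- within one decimal-width band, str is strictly monotone in lexicographic order
theorem pv_toChars_lt (i j : Int) (hij : i < j)
    (hband : (1 ≤ i ∧ j ≤ 9) ∨ (10 ≤ i ∧ j ≤ 99) ∨ (100 ≤ i ∧ j ≤ 999) ∨
      (1000 ≤ i ∧ j ≤ 9999)) :
    List.Lex (· < ·) (PySem.Int.toChars i) (PySem.Int.toChars j) := by
  have hab : i.toNat < j.toNat := by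
    rcases hband with ⟨h1, h2⟩ | ⟨h1, h2⟩ | ⟨h1, h2⟩ | ⟨h1, h2⟩ <;> omega
  rcases hband with ⟨h1, h2⟩ | ⟨h1, h2⟩ | ⟨h1, h2⟩ | ⟨h1, h2⟩
  · rw [pv_toChars1 i (by omega) (by omega), pv_toChars1 j (by omega) h2]
    exact List.Lex.rel (pv_digitChar_lt _ _ (by omega) (by omega))
  · rw [pv_toChars2 i h1 (by omega), pv_toChars2 j (by omega) h2]
    have hb2 : j.toNat ≤ 99 := by omega
    by_cases hd : i.toNat / 10 = j.toNat / 10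
    · rw [hd]; apply List.Lex.cons
      exact List.Lex.rel (pv_digitChar_lt _ _ (by omega) (by omega))
    · exact List.Lex.rel (pv_digitChar_lt _ _ (by omega) (by omega))
  · rw [pv_toChars3 i h1 (by omega), pv_toChars3 j (by omega) h2]
    have hb2 : j.toNat ≤ 999 := by omega
    have ha1 : 100 ≤ i.toNat := by omega
    by_cases hd2 : i.toNat / 100 = j.toNat / 100
    · rw [hd2]; apply List.Lex.cons
      by_cases hd1 : i.toNat / 10 % 10 = j.toNat / 10 % 10
      · rw [hd1]; apply List.Lex.cons
        exact List.Lex.rel (pv_digitChar_lt _ _ (by omega) (by omega))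
      · exact List.Lex.rel (pv_digitChar_lt _ _ (by omega) (by omega))
    · exact List.Lex.rel (pv_digitChar_lt _ _ (by omega) (by omega))
  · rw [pv_toChars4 i h1 (by omega), pv_toChars4 j (by omega) h2]
    have ha1 : 1000 ≤ i.toNat := by omega
    have hb2 : j.toNat ≤ 9999 := by omega
    by_cases h3 : i.toNat / 1000 = j.toNat / 1000
    · rw [h3]; apply List.Lex.cons
      by_cases hd2 : i.toNat / 100 % 10 = j.toNat / 100 % 10
      · rw [hd2]; apply List.Lex.cons
        by_cases hd1 : i.toNat / 10 % 10 = j.toNat / 10 % 10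
        · rw [hd1]; apply List.Lex.cons
          exact List.Lex.rel (pv_digitChar_lt _ _ (by omega) (by omega))
        · exact List.Lex.rel (pv_digitChar_lt _ _ (by omega) (by omega))
      · exact List.Lex.rel (pv_digitChar_lt _ _ (by omega) (by omega))
    · exact List.Lex.rel (pv_digitChar_lt _ _ (by omega) (by omega))

theorem pv_toChars_len_eq (i j : Int)
    (hband : (1 ≤ i ∧ j ≤ 9) ∨ (10 ≤ i ∧ j ≤ 99) ∨ (100 ≤ i ∧ j ≤ 999) ∨
      (1000 ≤ i ∧ j ≤ 9999)) (hij : i ≤ j) :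
    (PySem.Int.toChars i).length = (PySem.Int.toChars j).length := by
  rcases hband with ⟨h1, h2⟩ | ⟨h1, h2⟩ | ⟨h1, h2⟩ | ⟨h1, h2⟩
  · rw [pv_toChars1 i (by omega) (by omega), pv_toChars1 j (by omega) h2]; rfl
  · rw [pv_toChars2 i h1 (by omega), pv_toChars2 j (by omega) h2]; rfl
  · rw [pv_toChars3 i h1 (by omega), pv_toChars3 j (by omega) h2]; rfl
  · rw [pv_toChars4 i h1 (by omega), pv_toChars4 j (by omega) h2]; rfl

theorem pv_lex_append (l1 l2 s t : List Char) (h : List.Lex (· < ·) l1 l2)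
    (hlen : l1.length = l2.length) : List.Lex (· < ·) (l1 ++ s) (l2 ++ t) := by
  induction h with
  | nil => simp at hlen
  | rel h => exact List.Lex.rel h
  | cons h ih => exact List.Lex.cons (ih (by simpa using hlen))

theorem pv_lex_append_left (l s t : List Char) (h : List.Lex (· < ·) s t) :
    List.Lex (· < ·) (l ++ s) (l ++ t) := by
  induction l with
  | nil => simpa
  | cons c cs ih => exact List.Lex.cons ih

theorem pv_string_lt (s t : String) (h : List.Lex (· < ·) s.toList t.toList) : s < t := by
  rw [String.lt_iff_toList_lt]; exact String.lt_iff.mp h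

theorem pv_cand_sorted (by_ ey : Int)
    (hband : ey ≤ by_ ∨ (1 ≤ by_ ∧ ey ≤ 9) ∨ (10 ≤ by_ ∧ ey ≤ 99) ∨
      (100 ≤ by_ ∧ ey ≤ 999) ∨ (1000 ≤ by_ ∧ ey ≤ 9999)) :
    ((PySem.List.pyRange by_ (ey + 1) 1).flatMap
      (fun y => (["0630", "1231"]).map (fun m => PySem.Int.toStr y ++ m))).Pairwise (· ≤ ·) := by
  have hcross : ∀ y z : Int, by_ ≤ y → y < z → z ≤ ey → ∀ m1 m2 : String,
      PySem.Int.toStr y ++ m1 < PySem.Int.toStr z ++ m2 := by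
    intro y z hy hyz hz m1 m2
    have hband' : (1 ≤ y ∧ z ≤ 9) ∨ (10 ≤ y ∧ z ≤ 99) ∨ (100 ≤ y ∧ z ≤ 999) ∨
        (1000 ≤ y ∧ z ≤ 9999) := by
      rcases hband with h | ⟨h1, h2⟩ | ⟨h1, h2⟩ | ⟨h1, h2⟩ | ⟨h1, h2⟩
      · omega
      · left; omega
      · right; left; omega
      · right; right; left; omega
      · right; right; right; omega
    apply pv_string_lt
    rw [String.toList_append, String.toList_append, PySem.Int.toList_toStr, PySem.Int.toList_toStr]
    apply pv_lex_append _ _ _ _ (pv_toChars_lt y z hyz hband')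
    exact pv_toChars_len_eq y z hband' (le_of_lt hyz)
  apply List.Pairwise.imp (fun h => le_of_lt h)
  rw [List.pairwise_flatMap]
  constructor
  · intro y hy
    simp only [List.map_cons, List.map_nil]
    refine List.Pairwise.cons ?_ (List.Pairwise.cons (by simp) List.Pairwise.nil)
    intro s hs
    simp only [List.mem_cons, List.not_mem_nil, or_false] at hs
    subst hs
    apply pv_string_lt
    rw [String.toList_append, String.toList_append]
    exact pv_lex_append_left _ _ _ (by decide)
  · apply (PySem.List.pairwise_lt_pyRange_one by_ (ey + 1)).imp_of_mem
    intro y z hy hz hyz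
    have hmy := PySem.List.mem_pyRange_one.mp hy
    have hmz := PySem.List.mem_pyRange_one.mp hz
    intro u hu v hv
    simp only [List.map_cons, List.map_nil, List.mem_cons, List.not_mem_nil, or_false] at hu hv
    have h := hcross y z (by omega) hyz (by omega)
    rcases hu with hu | hu <;> rcases hv with hv | hv <;> subst hu <;> subst hv <;> exact h _ _

theorem pv_blLoop_spec (a : List String) (x : String) (hs : a.Pairwise (· ≤ ·)) :
    ∀ (n low hi : Nat), hi - low ≤ n → hi ≤ a.length →
    (∀ j (hj : j < a.length), j < low → a[j] < x) →
    (∀ j (hj : j < a.length), hi ≤ j → x ≤ a[j]) →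
    (∀ j (hj : j < a.length), j < pvBisectLeftLoop a x low hi → a[j] < x) ∧
    (∀ j (hj : j < a.length), pvBisectLeftLoop a x low hi ≤ j → x ≤ a[j]) := by
  have hpg := List.pairwise_iff_getElem.mp hs
  intro n
  induction n with
  | zero =>
    intro low hi hn hhi H1 H2
    rw [pvBisectLeftLoop, if_neg (by omega)]
    exact ⟨H1, fun j hj h => H2 j hj (by omega)⟩
  | succ n ih =>
    intro low hi hn hhi H1 H2
    by_cases hlh : low < hi
    · have hmlt : (low + hi) / 2 < hi := by omega
      have hmlen : (low + hi) / 2 < a.length := by omega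
      rw [pvBisectLeftLoop, if_pos hlh, List.getD_eq_getElem a "" hmlen]
      by_cases hc : a[(low + hi) / 2] < x
      · rw [if_pos hc]
        refine ih ((low + hi) / 2 + 1) hi (by omega) hhi ?_ H2
        intro j hj hjlt
        rcases Nat.lt_or_ge j ((low + hi) / 2) with h | h
        · exact lt_of_le_of_lt (hpg j _ hj hmlen h) hc
        · have : j = (low + hi) / 2 := by omega
          subst this; exact hc
      · rw [if_neg hc]
        refine ih low ((low + hi) / 2) (by omega) (by omega) H1 ?_
        intro j hj hmj
        rcases Nat.lt_or_ge ((low + hi) / 2) j with h | h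
        · exact le_trans (not_lt.mp hc) (hpg _ j hmlen hj h)
        · have : j = (low + hi) / 2 := by omega
          subst this; exact not_lt.mp hc
    · rw [pvBisectLeftLoop, if_neg hlh]
      exact ⟨H1, fun j hj h => H2 j hj (by omega)⟩

theorem pv_brLoop_spec (a : List String) (x : String) (hs : a.Pairwise (· ≤ ·)) :
    ∀ (n low hi : Nat), hi - low ≤ n → hi ≤ a.length →
    (∀ j (hj : j < a.length), j < low → a[j] ≤ x) →
    (∀ j (hj : j < a.length), hi ≤ j → x < a[j]) →
    (∀ j (hj : j < a.length), j < pvBisectRightLoop a x low hi → a[j] ≤ x) ∧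
    (∀ j (hj : j < a.length), pvBisectRightLoop a x low hi ≤ j → x < a[j]) := by
  have hpg := List.pairwise_iff_getElem.mp hs
  intro n
  induction n with
  | zero =>
    intro low hi hn hhi H1 H2
    rw [pvBisectRightLoop, if_neg (by omega)]
    exact ⟨H1, fun j hj h => H2 j hj (by omega)⟩
  | succ n ih =>
    intro low hi hn hhi H1 H2
    by_cases hlh : low < hi
    · have hmlt : (low + hi) / 2 < hi := by omega
      have hmlen : (low + hi) / 2 < a.length := by omega
      rw [pvBisectRightLoop, if_pos hlh, List.getD_eq_getElem a "" hmlen]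
      by_cases hc : x < a[(low + hi) / 2]
      · rw [if_pos hc]
        refine ih low ((low + hi) / 2) (by omega) (by omega) H1 ?_
        intro j hj hmj
        rcases Nat.lt_or_ge ((low + hi) / 2) j with h | h
        · exact lt_of_lt_of_le hc (hpg _ j hmlen hj h)
        · have : j = (low + hi) / 2 := by omega
          subst this; exact hc
      · rw [if_neg hc]
        refine ih ((low + hi) / 2 + 1) hi (by omega) hhi ?_ H2
        intro j hj hjlt
        rcases Nat.lt_or_ge j ((low + hi) / 2) with h | h
        · exact le_trans (hpg j _ hj hmlen h) (not_lt.mp hc)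
        · have : j = (low + hi) / 2 := by omega
          subst this; exact not_lt.mp hc
    · rw [pvBisectRightLoop, if_neg hlh]
      exact ⟨H1, fun j hj h => H2 j hj (by omega)⟩

-- a predicate that is false before lo, true on [lo, hi), false from hi selects the slice
theorem pv_filter_seg (xs : List String) (p : String → Bool) (lo hi : Nat)
    (H1 : ∀ j (hj : j < xs.length), j < lo → p xs[j] = false)
    (H2 : ∀ j (hj : j < xs.length), lo ≤ j → j < hi → p xs[j] = true)
    (H3 : ∀ j (hj : j < xs.length), hi ≤ j → p xs[j] = false) :
    xs.filter p = (xs.drop lo).take (hi - lo) := by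
  by_cases hle : hi ≤ lo
  · have h0 : hi - lo = 0 := by omega
    rw [h0, List.take_zero, List.filter_eq_nil_iff]
    intro a ha
    obtain ⟨j, hj, rfl⟩ := List.mem_iff_getElem.mp ha
    rcases Nat.lt_or_ge j hi with h | h
    · simp [H1 j hj (by omega)]
    · simp [H3 j hj h]
  · push Not at hle
    conv_lhs => rw [← List.take_append_drop lo xs,
      ← List.take_append_drop (hi - lo) (xs.drop lo)]
    rw [List.filter_append, List.filter_append]
    have e1 : (xs.take lo).filter p = [] := by
      rw [List.filter_eq_nil_iff]
      intro a ha
      obtain ⟨j, hj, rfl⟩ := List.mem_iff_getElem.mp ha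
      have hjlo : j < lo := lt_of_lt_of_le hj (by simp)
      rw [List.getElem_take]
      simp [H1 j (by simp at hj; omega) hjlo]
    have e2 : ((xs.drop lo).take (hi - lo)).filter p = (xs.drop lo).take (hi - lo) := by
      rw [List.filter_eq_self]
      intro a ha
      obtain ⟨k, hk, rfl⟩ := List.mem_iff_getElem.mp ha
      have hk' : k < hi - lo := lt_of_lt_of_le hk (by simp)
      have hkd : k < (xs.drop lo).length := lt_of_lt_of_le hk (by simp [List.length_take])
      rw [List.getElem_take, List.getElem_drop]
      exact H2 (lo + k) (by simp at hkd; omega) (by omega) (by omega)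
    have e3 : ((xs.drop lo).drop (hi - lo)).filter p = [] := by
      rw [List.drop_drop, List.filter_eq_nil_iff]
      intro a ha
      obtain ⟨k, hk, rfl⟩ := List.mem_iff_getElem.mp ha
      rw [List.getElem_drop]
      have hlen : lo + (hi - lo) + k < xs.length := by simp at hk; omega
      simp [H3 (lo + (hi - lo) + k) hlen (by omega)]
    rw [e1, e2, e3, List.nil_append, List.append_nil]

-- ===== VERDICT (by name: the statement is the Claim_ definition above) =====
theorem getHYtime4list_spec : Claim_equal_getHYtime4list := by
  intro b l _ hpre
  obtain ⟨h1, h2, h3⟩ := hpre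
  obtain ⟨by_, hb⟩ := Option.isSome_iff_exists.mp h1
  obtain ⟨ey, hl⟩ := Option.isSome_iff_exists.mp h2
  rw [hb, hl] at h3
  simp only [Option.getD_some] at h3
  unfold Spec_getHYtime4list getHYtime4list getHYtime4list_alt
  simp only [hb, hl]
  rw [PySem.List.foldl_append_ite_eq_filter (fun i => l ≥ i ∧ i ≥ b)]
  rw [List.nil_append]
  set cand := (PySem.List.pyRange by_ (ey + 1) 1).flatMap
    (fun y => (["0630", "1231"]).map (fun m => PySem.Int.toStr y ++ m)) with hcand
  have hsorted : cand.Pairwise (· ≤ ·) := pv_cand_sorted by_ ey h3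
  have hL := pv_blLoop_spec cand b hsorted cand.length 0 cand.length (by omega) (le_refl _)
    (by intro j hj h; omega) (by intro j hj h; omega)
  have hR := pv_brLoop_spec cand l hsorted cand.length 0 cand.length (by omega) (le_refl _)
    (by intro j hj h; omega) (by intro j hj h; omega)
  rw [PySem.List.slice_natCast]
  apply pv_filter_seg
  · intro j hj hjL
    have hlt := hL.1 j hj hjL
    simp only [ge_iff_le, decide_eq_false_iff_not, not_and]
    intro _ hgeb
    exact absurd hlt (not_lt.mpr hgeb)
  · intro j hj hLj hjR
    have hgeb := hL.2 j hj hLj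
    have hlel := hR.1 j hj hjR
    simp only [ge_iff_le, decide_eq_true_eq]
    exact ⟨hlel, hgeb⟩
  · intro j hj hRj
    have hlt := hR.2 j hj hRj
    simp only [ge_iff_le, decide_eq_false_iff_not, not_and]
    intro hle _
    exact absurd hlt (not_lt.mpr hle)
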